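-- pv_equiv track=rewrite | github.com/FuadGoloba/Algorithmic-Toolbox | 2. Algorithmic Warmup/8_last_digit_of_sum_of_squares_of_fibonacci_numbers/last_digit_of_sum_of_squares_of_fibonacci_numbers.py | last_digit_of_fibonacci_number
-- ===== SOURCE A (Python) =====
-- def last_digit_of_fibonacci_number(n):
--     if n <= 1:
--         return n
--
--     period = get_pisano_period(10)
--     n = n % period
--
--     fib = [0, 1]
--     for i in range(2, n + 1):
--         fib.append((fib[i - 1] + fib[i - 2]) % 10)
--     return fib[n]
--
-- def get_pisano_period(m):
--     current = 0
--     nxt = 1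
--     period = 0
--     while True:
--         old_nxt = nxt
--         nxt = (current + nxt) % m
--         current = old_nxt
--         period += 1
--         if current == 0 and nxt == 1:
--             return period
-- ===== SOURCE B (Python) =====
-- def last_digit_of_fibonacci_number(n):
--     if n <= 1:
--         return n
--     return fib_pair(n)[0]
--
-- def fib_pair(k):
--     # (F(k) mod 10, F(k+1) mod 10) by fast doubling on the bits of k
--     if k == 0:
--         return (0, 1)
--     a, b = fib_pair(k >> 1)
--     c = a * (2 * b - a) % 10
--     d = (a * a + b * b) % 10
--     if k & 1:
--         return (d, (c + d) % 10)
--     else: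
--         return (c, d)
-- ===== Notes on version B (the rewrite author's own statement) =====
-- stated objective: alternative
-- what changed: Replaces the Pisano-period search plus a table of Fibonacci last digits with fast-doubling recursion on the bits of n, maintaining only the pair (F(k), F(k+1)) mod 10.
import Mathlib
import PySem

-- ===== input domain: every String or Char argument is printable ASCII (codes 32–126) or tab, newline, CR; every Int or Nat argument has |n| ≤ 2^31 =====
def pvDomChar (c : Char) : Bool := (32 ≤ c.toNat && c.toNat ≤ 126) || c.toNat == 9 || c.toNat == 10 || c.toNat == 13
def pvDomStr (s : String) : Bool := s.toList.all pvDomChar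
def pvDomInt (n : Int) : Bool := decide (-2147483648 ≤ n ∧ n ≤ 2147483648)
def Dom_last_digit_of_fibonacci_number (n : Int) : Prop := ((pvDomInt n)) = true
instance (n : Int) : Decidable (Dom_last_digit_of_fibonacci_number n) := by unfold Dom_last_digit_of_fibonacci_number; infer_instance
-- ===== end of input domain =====

-- B replaces A's Pisano-period search and Fibonacci table with fast doubling mod 10 on the bits of n
-- (a different algorithm of similar cost, no speed claim).

-- ===== PORT A =====
-- while-True loop of get_pisano_period, with a fuel bound only for totality
-- (the Python loop for m = 10 returns after exactly 60 iterations, well below the fuel).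
def getPisanoLoop (m : Int) (current nxt period : Int) : Nat → Int
  | 0 => period
  | fuel + 1 =>
    let old_nxt := nxt
    let nxt' := PySem.Int.mod (current + nxt) m
    let current' := old_nxt
    let period' := period + 1
    if current' = 0 ∧ nxt' = 1 then period'
    else getPisanoLoop m current' nxt' period' fuel

def get_pisano_period (m : Int) : Int := getPisanoLoop m 0 1 0 1000

-- the list `fib` after the for-loop, for the reduced index n'
-- (Python's fib[i-1] / fib[i-2] never raise on the reached indices; .getD 0 marks exactly that)
def fibTable (n' : Int) : List Int :=
  (PySem.List.pyRange 2 (n' + 1) 1).foldl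
    (fun fib i =>
      fib ++ [PySem.Int.mod ((PySem.List.pyGet? fib (i - 1)).getD 0 +
                             (PySem.List.pyGet? fib (i - 2)).getD 0) 10])
    [0, 1]

def last_digit_of_fibonacci_number (n : Int) : Int :=
  if n ≤ 1 then n
  else
    let period := get_pisano_period 10
    let n' := PySem.Int.mod n period
    (PySem.List.pyGet? (fibTable n') n').getD 0

-- ===== PORT B =====
-- fib_pair(k) = (F(k) mod 10, F(k+1) mod 10) by fast doubling on the bits of k
def fibPair (k : Nat) : Int × Int :=
  if h : k = 0 then (0, 1)
  else
    let p := fibPair (k / 2)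
    let a := p.1
    let b := p.2
    let c := PySem.Int.mod (a * (2 * b - a)) 10
    let d := PySem.Int.mod (a * a + b * b) 10
    if k % 2 = 1 then (d, PySem.Int.mod (c + d) 10) else (c, d)
  decreasing_by exact Nat.div_lt_self (Nat.pos_of_ne_zero h) (by omega)

def last_digit_of_fibonacci_number_alt (n : Int) : Int :=
  if n ≤ 1 then n else (fibPair n.toNat).1

-- ===== PRECONDITION & SPEC =====
def Spec_last_digit_of_fibonacci_number (n : Int) (out : Int) : Prop := out = last_digit_of_fibonacci_number_alt n
instance (n : Int) (out : Int) : Decidable (Spec_last_digit_of_fibonacci_number n out) := by unfold Spec_last_digit_of_fibonacci_number; infer_instance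

-- ===== CLAIM (what is proved, stated in full; the proofs are below) =====
def Claim_equal_last_digit_of_fibonacci_number : Prop := ∀ (n : Int), Dom_last_digit_of_fibonacci_number n → Spec_last_digit_of_fibonacci_number n (last_digit_of_fibonacci_number n)

-- ===== LEMMAS AND PROOFS =====


-- fast doubling computes the Fibonacci pair mod 10
theorem fib_pair_period (k : Nat) :
    Nat.fib (k + 60) % 10 = Nat.fib k % 10 ∧ Nat.fib (k + 61) % 10 = Nat.fib (k + 1) % 10 := by
  induction k with
  | zero => decide
  | succ k ih =>
    obtain ⟨h1, h2⟩ := ih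
    constructor
    · simpa [show k + 1 + 60 = k + 61 from by omega] using h2
    · have hA := Nat.fib_add_two (n := k + 60)
      have hB := Nat.fib_add_two (n := k)
      rw [show k + 1 + 61 = k + 60 + 2 from by omega, show k + 1 + 1 = k + 2 from by omega,
          hA, hB, show k + 60 + 1 = k + 61 from by omega]
      omega

theorem fib_mod10_period (k : Nat) : Nat.fib (k + 60) % 10 = Nat.fib k % 10 :=
  (fib_pair_period k).1

theorem fib_mod10_mod60 (k : Nat) : Nat.fib k % 10 = Nat.fib (k % 60) % 10 := by
  have aux : ∀ q r, Nat.fib (60 * q + r) % 10 = Nat.fib r % 10 := by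
    intro q
    induction q with
    | zero => intro r; simp
    | succ q ih =>
      intro r
      have : 60 * (q + 1) + r = (60 * q + r) + 60 := by omega
      rw [this, fib_mod10_period, ih]
  conv_lhs => rw [← Nat.div_add_mod k 60]
  exact aux (k / 60) (k % 60)

theorem fib_c (m : Nat) :
    PySem.Int.mod (((Nat.fib m : Int) % 10) * (2 * ((Nat.fib (m+1) : Int) % 10) - (Nat.fib m : Int) % 10)) 10
      = (Nat.fib (2*m) : Int) % 10 := by
  rw [PySem.Int.mod_eq_emod_of_pos (by norm_num)]
  have ha : ((Nat.fib m : Int) % 10) ≡ (Nat.fib m : Int) [ZMOD 10] := Int.emod_emod_of_dvd _ dvd_rfl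
  have hb : ((Nat.fib (m+1) : Int) % 10) ≡ (Nat.fib (m+1) : Int) [ZMOD 10] := Int.emod_emod_of_dvd _ dvd_rfl
  have hle : Nat.fib m ≤ 2 * Nat.fib (m+1) := le_trans (Nat.fib_le_fib_succ) (by omega)
  have hfib : (Nat.fib (2*m) : Int) = (Nat.fib m : Int) * (2 * (Nat.fib (m+1) : Int) - (Nat.fib m : Int)) := by
    rw [Nat.fib_two_mul]; push_cast [hle]; ring
  rw [hfib]
  exact ha.mul (((hb.mul_left 2)).sub ha)

theorem fib_d (m : Nat) :
    PySem.Int.mod (((Nat.fib m : Int) % 10) * ((Nat.fib m : Int) % 10) + ((Nat.fib (m+1) : Int) % 10) * ((Nat.fib (m+1) : Int) % 10)) 10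
      = (Nat.fib (2*m+1) : Int) % 10 := by
  rw [PySem.Int.mod_eq_emod_of_pos (by norm_num)]
  have ha : ((Nat.fib m : Int) % 10) ≡ (Nat.fib m : Int) [ZMOD 10] := Int.emod_emod_of_dvd _ dvd_rfl
  have hb : ((Nat.fib (m+1) : Int) % 10) ≡ (Nat.fib (m+1) : Int) [ZMOD 10] := Int.emod_emod_of_dvd _ dvd_rfl
  have hfib : (Nat.fib (2*m+1) : Int) = (Nat.fib m : Int) * (Nat.fib m : Int) + (Nat.fib (m+1) : Int) * (Nat.fib (m+1) : Int) := by
    rw [Nat.fib_two_mul_add_one]; push_cast; ring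
  rw [hfib]
  exact (ha.mul ha).add (hb.mul hb)

theorem fib_cd (m : Nat) :
    PySem.Int.mod ((Nat.fib (2*m) : Int) % 10 + (Nat.fib (2*m+1) : Int) % 10) 10
      = (Nat.fib (2*m+2) : Int) % 10 := by
  rw [PySem.Int.mod_eq_emod_of_pos (by norm_num)]
  have : (Nat.fib (2*m+2) : Int) = (Nat.fib (2*m) : Int) + (Nat.fib (2*m+1) : Int) := by
    rw [Nat.fib_add_two]; push_cast; ring
  rw [this]
  omega

theorem fibPair_eq (k : Nat) :
    fibPair k = (((Nat.fib k : Int)) % 10, ((Nat.fib (k + 1) : Int)) % 10) := by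
  induction k using Nat.strong_induction_on with
  | _ k ih =>
    rw [fibPair]
    by_cases h0 : k = 0
    · subst h0; norm_num
    · rw [dif_neg h0]
      simp only [ih (k / 2) (Nat.div_lt_self (Nat.pos_of_ne_zero h0) (by omega))]
      rw [fib_c (k / 2), fib_d (k / 2)]
      by_cases hpar : k % 2 = 1
      · rw [if_pos hpar, fib_cd (k / 2)]
        have e1 : 2 * (k / 2) + 1 = k := by omega
        have e2 : 2 * (k / 2) + 2 = k + 1 := by omega
        rw [e1, e2]
      · rw [if_neg hpar]
        rw [show 2 * (k / 2) = k from by omega]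

-- Pisano: last digits of Fibonacci repeat with period 60

-- A's table lookup equals the Fibonacci last digit, for every reduced index
theorem fibTable_lookup (r : Nat) (h : r < 60) :
    (PySem.List.pyGet? (fibTable (r : Int)) (r : Int)).getD 0 = ((Nat.fib r % 10 : Nat) : Int) := by
  revert h; revert r; decide

theorem pisano_ten : get_pisano_period 10 = 60 := by decide

-- ===== VERDICT (by name: the statement is the Claim_ definition above) =====
theorem last_digit_of_fibonacci_number_spec : Claim_equal_last_digit_of_fibonacci_number := by
  intro n _
  unfold Spec_last_digit_of_fibonacci_number last_digit_of_fibonacci_number last_digit_of_fibonacci_number_alt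
  by_cases hn : n ≤ 1
  · simp [hn]
  · simp only [hn, if_false]
    rw [pisano_ten]
    have h2 : (2 : Int) ≤ n := by omega
    have hmod : PySem.Int.mod n 60 = ((n.toNat % 60 : Nat) : Int) := by
      have : n = ((n.toNat : Nat) : Int) := by omega
      rw [this]
      exact_mod_cast PySem.Int.mod_natCast n.toNat 60
    rw [hmod, fibTable_lookup (n.toNat % 60) (Nat.mod_lt _ (by omega)),
        fibPair_eq]
    have h := fib_mod10_mod60 n.toNat
    push_cast
    omega
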